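-- pv_equiv track=rewrite | github.com/hoyonzz/Algorithm_study | 프로그래머스/2/150368. 이모티콘 할인행사/이모티콘 할인행사.py | solution
-- ===== SOURCE A (Python) =====
-- def solution(users, emoticons):
--     answer = [0, 0]
--     discounts = [10, 20, 30, 40]
--     current_discounts = []
--
--     def dfs(depth):
--         if depth == len(emoticons):
--             sub, sales = 0, 0
--             for user_rate, user_price in users:
--                 purchase_price = 0
--                 for i in range(len(emoticons)):
--                     if user_rate <= current_discounts[i]:
--                         purchase_price += emoticons[i] * (100-current_discounts[i]) // 100
--                 if purchase_price >= user_price: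
--                             purchase_price = 0
--                             sub += 1
--                 else:
--                     sales += purchase_price
--
--             if answer[0] < sub:
--                 answer[0], answer[1] = sub, sales
--             elif answer[0] == sub and answer[1] < sales:
--                 answer[1] = sales
--             return
--
--         # 백트레킹
--         for rate in discounts:
--             current_discounts.append(rate)
--             dfs(depth+1)
--             current_discounts.pop()
--
--     dfs(0)
--
--     return answer
-- ===== SOURCE B (Python) =====
-- from itertools import product
--
-- def solution(users, emoticons):
--     best = (0, 0)
--     for combo in product((10, 20, 30, 40), repeat=len(emoticons)):
--         sub = 0
--         sales = 0
--         for rate, price in users: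
--             cost = sum(e * (100 - d) // 100 for e, d in zip(emoticons, combo) if rate <= d)
--             if cost >= price:
--                 sub += 1
--             else:
--                 sales += cost
--         if (sub, sales) > best:
--             best = (sub, sales)
--     return list(best)
-- ===== Notes on version B (the rewrite author's own statement) =====
-- stated objective: idiomatic
-- what changed: Replaces the mutable-state recursive dfs/backtracking with a flat iteration over itertools.product, a zip-based sum comprehension for each user's cost, and a lexicographic tuple-max in place of the two-branch answer update.
import Mathlib
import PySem

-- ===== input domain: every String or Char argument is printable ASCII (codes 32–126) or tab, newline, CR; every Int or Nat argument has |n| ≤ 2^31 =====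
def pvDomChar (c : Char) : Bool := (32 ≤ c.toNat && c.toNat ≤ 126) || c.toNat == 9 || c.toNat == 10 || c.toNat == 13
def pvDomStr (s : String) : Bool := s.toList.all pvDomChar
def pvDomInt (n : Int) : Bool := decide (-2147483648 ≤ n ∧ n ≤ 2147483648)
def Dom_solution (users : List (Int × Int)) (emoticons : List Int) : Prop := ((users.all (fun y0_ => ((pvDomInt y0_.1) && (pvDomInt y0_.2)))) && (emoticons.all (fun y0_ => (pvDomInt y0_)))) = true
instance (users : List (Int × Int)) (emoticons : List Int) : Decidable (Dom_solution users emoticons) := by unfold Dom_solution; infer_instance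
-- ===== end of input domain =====

-- B replaces the recursive dfs/backtracking with a flat fold over the product list,
-- a zip-filter-sum per user, and a lexicographic tuple max; same cost, more idiomatic.

-- ===== PORT A =====
-- purchase_price loop: for i in range(len(emoticons)): if user_rate <= current_discounts[i]: ...
-- (indices are always in range inside dfs, so pyGetD with default 0 is exact here)
def evalUserA (emoticons cur : List Int) (rate : Int) : Int :=
  (PySem.List.pyRange 0 (emoticons.length : Int) 1).foldl
    (fun pp i =>
      if rate ≤ PySem.List.pyGetD cur i 0 then
        pp + PySem.Int.floordiv (PySem.List.pyGetD emoticons i 0 * (100 - PySem.List.pyGetD cur i 0)) 100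
      else pp) 0

-- the leaf: loop over users accumulating (sub, sales)
def evalA (users : List (Int × Int)) (emoticons cur : List Int) : Int × Int :=
  users.foldl (fun acc up =>
    if evalUserA emoticons cur up.1 ≥ up.2 then (acc.1 + 1, acc.2)
    else (acc.1, acc.2 + evalUserA emoticons cur up.1)) (0, 0)

-- if answer[0] < sub: ... elif answer[0] == sub and answer[1] < sales: ...
def updateA (ans v : Int × Int) : Int × Int :=
  if ans.1 < v.1 then v
  else if ans.1 = v.1 ∧ ans.2 < v.2 then (ans.1, v.2)
  else ans

-- dfs(depth); fuel = len(emoticons) - depth, current_discounts built by append/pop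
def dfsA (users : List (Int × Int)) (emoticons : List Int) : Nat → List Int → Int × Int → Int × Int
  | 0, cur, ans => updateA ans (evalA users emoticons cur)
  | n + 1, cur, ans =>
      [(10 : Int), 20, 30, 40].foldl (fun a r => dfsA users emoticons n (cur ++ [r]) a) ans

def solution (users : List (Int × Int)) (emoticons : List Int) : List Int :=
  let a := dfsA users emoticons emoticons.length [] (0, 0)
  [a.1, a.2]

-- ===== PORT B =====
-- itertools.product((10,20,30,40), repeat=n), leftmost position varying slowest
def prodList : Nat → List (List Int)
  | 0 => [[]]
  | n + 1 => [(10 : Int), 20, 30, 40].flatMap (fun r => (prodList n).map (fun c => r :: c))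

-- sum(e * (100 - d) // 100 for e, d in zip(emoticons, combo) if rate <= d)
def costB (emoticons combo : List Int) (rate : Int) : Int :=
  (((emoticons.zip combo).filter (fun ed => rate ≤ ed.2)).map
    (fun ed => PySem.Int.floordiv (ed.1 * (100 - ed.2)) 100)).sum

def evalB (users : List (Int × Int)) (emoticons combo : List Int) : Int × Int :=
  users.foldl (fun acc up =>
    if costB emoticons combo up.1 ≥ up.2 then (acc.1 + 1, acc.2)
    else (acc.1, acc.2 + costB emoticons combo up.1)) (0, 0)

-- if (sub, sales) > best: best = (sub, sales)   (tuple comparison is lexicographic)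
def lexMax (b v : Int × Int) : Int × Int :=
  if b.1 < v.1 ∨ (b.1 = v.1 ∧ b.2 < v.2) then v else b

def solution_alt (users : List (Int × Int)) (emoticons : List Int) : List Int :=
  let best := (prodList emoticons.length).foldl
    (fun b c => lexMax b (evalB users emoticons c)) (0, 0)
  [best.1, best.2]

-- ===== PRECONDITION & SPEC =====
def Spec_solution (users : List (Int × Int)) (emoticons : List Int) (out : List Int) : Prop := out = solution_alt users emoticons
instance (users : List (Int × Int)) (emoticons : List Int) (out : List Int) : Decidable (Spec_solution users emoticons out) := by unfold Spec_solution; infer_instance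

-- ===== CLAIM (what is proved, stated in full; the proofs are below) =====
def Claim_equal_solution : Prop := ∀ (users : List (Int × Int)) (emoticons : List Int), Dom_solution users emoticons → Spec_solution users emoticons (solution users emoticons)

-- ===== LEMMAS AND PROOFS =====

-- A's two-branch answer update is the lexicographic max
theorem updateA_eq_lexMax (ans v : Int × Int) : updateA ans v = lexMax ans v := by
  unfold updateA lexMax
  by_cases h1 : ans.1 < v.1
  · simp [h1]
  · by_cases h2 : ans.1 = v.1 ∧ ans.2 < v.2
    · simp [h2]
    · simp [h1, h2]

-- generic: sum over mapped filter = guarded accumulating foldl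
theorem sum_map_filter_foldl (l : List (Int × Int)) (p : Int × Int → Prop) [DecidablePred p]
    (f : Int × Int → Int) (init : Int) :
    l.foldl (fun pp x => if p x then pp + f x else pp) init
      = init + ((l.filter (fun x => decide (p x))).map f).sum := by
  induction l generalizing init with
  | nil => simp
  | cons x xs ih =>
      by_cases h : p x <;> simp [List.foldl_cons, h, ih, add_assoc]

-- A's indexed purchase-price loop equals B's zip-filter-sum when lengths agree
theorem evalUserA_eq_costB (emoticons cur : List Int) (rate : Int)
    (h : cur.length = emoticons.length) :
    evalUserA emoticons cur rate = costB emoticons cur rate := by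
  unfold evalUserA costB
  have hz : (emoticons.zip cur).length = emoticons.length := by
    simp [List.length_zip, h]
  have hcongr :
      (PySem.List.pyRange 0 (emoticons.length : Int) 1).foldl
        (fun pp i =>
          if rate ≤ PySem.List.pyGetD cur i 0 then
            pp + PySem.Int.floordiv (PySem.List.pyGetD emoticons i 0 * (100 - PySem.List.pyGetD cur i 0)) 100
          else pp) 0
      = (PySem.List.pyRange 0 ((emoticons.zip cur).length : Int) 1).foldl
        (fun pp i =>
          (fun pp (ed : Int × Int) =>
            if rate ≤ ed.2 then pp + PySem.Int.floordiv (ed.1 * (100 - ed.2)) 100 else pp)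
            pp (PySem.List.pyGetD (emoticons.zip cur) i (0, 0))) 0 := by
    rw [hz]
    refine PySem.List.foldl_congr_mem _ _ _ _ ?_
    intro acc i hi
    rcases PySem.List.mem_pyRange_one.1 hi with ⟨h0, h1⟩
    have h1e : i < (emoticons.length : Int) := h1
    have h1c : i < (cur.length : Int) := by rw [h]; exact h1
    have h1z : i < ((emoticons.zip cur).length : Int) := by rw [hz]; exact h1
    rw [PySem.List.pyGetD_eq_getElem _ _ h0 h1e, PySem.List.pyGetD_eq_getElem _ _ h0 h1c,
        PySem.List.pyGetD_eq_getElem _ _ h0 h1z]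
    simp [List.getElem_zip]
  rw [hcongr]
  have := PySem.List.foldl_pyRange_zero_pyGetD (emoticons.zip cur) ((0 : Int), (0 : Int))
    (fun pp (ed : Int × Int) =>
      if rate ≤ ed.2 then pp + PySem.Int.floordiv (ed.1 * (100 - ed.2)) 100 else pp) 0
  rw [show PySem.List.len (emoticons.zip cur) = ((emoticons.zip cur).length : Int) from rfl] at this
  rw [this]
  rw [sum_map_filter_foldl (emoticons.zip cur) (fun ed => rate ≤ ed.2)
        (fun ed => PySem.Int.floordiv (ed.1 * (100 - ed.2)) 100) 0]
  simp

theorem evalA_eq_evalB (users : List (Int × Int)) (emoticons cur : List Int)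
    (h : cur.length = emoticons.length) :
    evalA users emoticons cur = evalB users emoticons cur := by
  unfold evalA evalB
  refine PySem.List.foldl_congr_mem _ _ _ _ ?_
  intro acc up _
  rw [evalUserA_eq_costB emoticons cur up.1 h]

theorem length_of_mem_prodList : ∀ n, ∀ c ∈ prodList n, c.length = n := by
  intro n
  induction n with
  | zero => intro c hc; simp [prodList] at hc; simp [hc]
  | succ n ih =>
      intro c hc
      simp only [prodList, List.mem_flatMap, List.mem_map] at hc
      rcases hc with ⟨r, _, c', hc', rfl⟩
      simp [ih c' hc']

-- the dfs traversal is the fold over the product list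
theorem dfsA_eq_foldl (users : List (Int × Int)) (emoticons : List Int) :
    ∀ n cur ans, dfsA users emoticons n cur ans
      = (prodList n).foldl (fun a c => updateA a (evalA users emoticons (cur ++ c))) ans := by
  intro n
  induction n with
  | zero => intro cur ans; simp [dfsA, prodList]
  | succ n ih =>
      intro cur ans
      show ([(10 : Int), 20, 30, 40].foldl (fun a r => dfsA users emoticons n (cur ++ [r]) a) ans) = _
      have aux : ∀ (rs : List Int) (ans : Int × Int),
          rs.foldl (fun a r => dfsA users emoticons n (cur ++ [r]) a) ans
            = (rs.flatMap (fun r => (prodList n).map (fun c => r :: c))).foldl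
                (fun a c => updateA a (evalA users emoticons (cur ++ c))) ans := by
        intro rs
        induction rs with
        | nil => intro ans; simp
        | cons r rs ihr =>
            intro ans
            simp only [List.foldl_cons, List.flatMap_cons, List.foldl_append, List.foldl_map]
            rw [← ihr]
            congr 1
            rw [ih]
            refine PySem.List.foldl_congr_mem _ _ _ _ ?_
            intro a c _
            simp [List.append_assoc]
      rw [aux]
      rfl

-- ===== VERDICT (by name: the statement is the Claim_ definition above) =====
theorem solution_spec : Claim_equal_solution := by
  intro users emoticons _
  unfold Spec_solution solution solution_alt
  rw [dfsA_eq_foldl]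
  have := PySem.List.foldl_congr_mem (prodList emoticons.length)
    (fun a c => updateA a (evalA users emoticons ([] ++ c)))
    (fun b c => lexMax b (evalB users emoticons c)) (0, 0) ?_
  · rw [this]
  · intro acc c hc
    simp only []
    rw [List.nil_append, evalA_eq_evalB users emoticons c
          (length_of_mem_prodList emoticons.length c hc), updateA_eq_lexMax]
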